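-- pv_equiv track=rewrite | github.com/pawel002/Convex-Hull | algorithms/increment.py | leftTangent
-- ===== SOURCE A (Python) =====
-- def isLeft(a,b,c):
--     return (b[0] - a[0])*(c[1] - a[1]) - (c[0] - a[0])*(b[1]-a[1])
--
-- def above (p,vi,vj):
--     return(isLeft(p,vi,vj) > 0)
--
-- def below(p,vi,vj):
--     return(isLeft(p,vi,vj) < 0)
--
-- def leftTangent(p, n, V):
--
--     if (not below(p, V[1], V[0])) and (above(p, V[n-1], V[0])): return 0
--     a, b = 0, n
--     while True:
--         c = (a+b)//2
--         dnC = below(p, V[c+1], V[c])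
--         if ((not dnC) and above(p, V[c-1], V[c])): return c
--
--         dnA = below(p, V[a+1], V[a])
--         if(dnA):
--             if(not dnC):
--                 b = c
--             else:
--                 if below(p,V[a], V[c]):
--                     b = c
--                 else:
--                     a = c
--         else:
--             if (dnC):
--                 a = c
--             else:
--                 if (above(p, V[a], V[c])):
--                     b = c
--                 else:
--                     a = c
-- ===== SOURCE B (Python) =====
-- def isLeft(a, b, c):
--     return (b[0] - a[0]) * (c[1] - a[1]) - (c[0] - a[0]) * (b[1] - a[1])
--
-- def above(p, vi, vj):
--     return isLeft(p, vi, vj) > 0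
--
-- def below(p, vi, vj):
--     return isLeft(p, vi, vj) < 0
--
-- def leftTangent(p, n, V):
--     if (not below(p, V[1], V[0])) and above(p, V[n - 1], V[0]):
--         return 0
--     for i in range(1, n):
--         if (not below(p, V[i + 1], V[i])) and above(p, V[i - 1], V[i]):
--             return i
--     raise ValueError("no tangent: vertices not in convex position as seen from p")
-- ===== Notes on version B (the rewrite author's own statement) =====
-- stated objective: simpler
-- what changed: Replaced the interval-halving binary search over [0,n) (with its four-way branch logic) by a single left-to-right linear scan that returns the first index whose tangent test fires, after the same index-0 special case.
-- outside the precondition, e.g. on leftTangent((7, 4), 1, [(5, -1), (-4, 0)]): A returns 0, B raises ValueError; on leftTangent((-3, -5), 6, [(0, -3), (5, 0), (-2, 5), (-1, 4), (-4, -1), (-3, -3)]): A returns 4, B returns 2; on leftTangent((-5, -2), 6, [(4, 4), (2, 4), (3, 1), (-4, 2), (3, -1), (0, 1)]): A returns 3, B returns 1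
import Mathlib
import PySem

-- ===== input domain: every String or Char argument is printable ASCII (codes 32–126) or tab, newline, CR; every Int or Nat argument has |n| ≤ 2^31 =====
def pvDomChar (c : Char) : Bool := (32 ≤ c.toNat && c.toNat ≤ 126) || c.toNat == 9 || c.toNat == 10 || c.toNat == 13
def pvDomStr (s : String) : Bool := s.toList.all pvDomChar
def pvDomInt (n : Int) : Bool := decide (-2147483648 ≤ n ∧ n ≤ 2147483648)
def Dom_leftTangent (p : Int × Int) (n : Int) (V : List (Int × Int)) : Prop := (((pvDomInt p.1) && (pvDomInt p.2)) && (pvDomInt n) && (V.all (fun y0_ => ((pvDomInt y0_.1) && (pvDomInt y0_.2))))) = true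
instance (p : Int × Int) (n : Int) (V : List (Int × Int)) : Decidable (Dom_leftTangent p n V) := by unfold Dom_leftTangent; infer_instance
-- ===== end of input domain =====

-- B replaces A's interval-halving binary search by a single linear scan with the same
-- tangent test (objective: simpler); equivalence is claimed on Pre_, the inputs where the
-- cross-product order from p is strict and transitive with a unique tangent index < n-1.

-- shared geometric helpers (same-module helpers of the Python source)
def pvIsLeft (a b c : Int × Int) : Int := (b.1 - a.1) * (c.2 - a.2) - (c.1 - a.1) * (b.2 - a.2)
def pvAbove (p vi vj : Int × Int) : Bool := decide (0 < pvIsLeft p vi vj)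
def pvBelow (p vi vj : Int × Int) : Bool := decide (pvIsLeft p vi vj < 0)
-- V[i] with Python index semantics; the default is only reachable where the Python raises
-- IndexError, which Pre_ excludes
def pvGet (V : List (Int × Int)) (i : Int) : Int × Int := PySem.List.pyGetD V i (0, 0)
-- the index-0 special-case check both programs open with
def pvChk (p : Int × Int) (n : Int) (V : List (Int × Int)) : Bool :=
  (!pvBelow p (pvGet V 1) (pvGet V 0)) && pvAbove p (pvGet V (n - 1)) (pvGet V 0)
-- the tangent test both programs apply at index i (non-wrapped neighbours i-1, i+1)
def pvTestI (p : Int × Int) (V : List (Int × Int)) (i : Int) : Bool :=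
  (!pvBelow p (pvGet V (i + 1)) (pvGet V i)) && pvAbove p (pvGet V (i - 1)) (pvGet V i)

-- ===== PORT A =====
-- the 'while True' loop; fuel only bounds the iteration count (the Python can loop forever
-- outside Pre_; inside Pre_ it returns within V.length iterations, proved below)
def leftTangentLoop (p : Int × Int) (V : List (Int × Int)) : Nat → Int → Int → Int
  | 0, _, _ => 0
  | fuel + 1, a, b =>
    let c := PySem.Int.floordiv (a + b) 2
    let dnC := pvBelow p (pvGet V (c + 1)) (pvGet V c)
    if (!dnC) && pvAbove p (pvGet V (c - 1)) (pvGet V c) then c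
    else
      let dnA := pvBelow p (pvGet V (a + 1)) (pvGet V a)
      if dnA then
        if !dnC then leftTangentLoop p V fuel a c
        else if pvBelow p (pvGet V a) (pvGet V c) then leftTangentLoop p V fuel a c
        else leftTangentLoop p V fuel c b
      else
        if dnC then leftTangentLoop p V fuel c b
        else if pvAbove p (pvGet V a) (pvGet V c) then leftTangentLoop p V fuel a c
        else leftTangentLoop p V fuel c b

def leftTangent (p : Int × Int) (n : Int) (V : List (Int × Int)) : Int :=
  if pvChk p n V then 0
  else leftTangentLoop p V (V.length + 2) 0 n

-- ===== PORT B =====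
-- 'for i in range(1, n)'; fuel = number of remaining iterations; at fuel 0 the Python
-- raises ValueError (only reachable outside Pre_)
def leftTangentScan (p : Int × Int) (V : List (Int × Int)) : Nat → Int → Int
  | 0, _ => 0
  | fuel + 1, i =>
    if pvTestI p V i then i
    else leftTangentScan p V fuel (i + 1)

def leftTangent_alt (p : Int × Int) (n : Int) (V : List (Int × Int)) : Int :=
  if pvChk p n V then 0
  else leftTangentScan p V (n - 1).toNat 1

-- ===== PRECONDITION & SPEC =====
-- cross product of V[i], V[j] as seen from p, Nat indices
def pvL (p : Int × Int) (V : List (Int × Int)) (i j : Nat) : Int :=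
  pvIsLeft p (V.getD i (0, 0)) (V.getD j (0, 0))
-- edge i descends as seen from p (cyclic successor)
def pvDn (p : Int × Int) (V : List (Int × Int)) (i : Nat) : Bool :=
  decide (pvL p V ((i + 1) % V.length) i < 0)
-- the tangent test of both programs at index i, with cyclic neighbours
def pvTang (p : Int × Int) (V : List (Int × Int)) (i : Nat) : Bool :=
  (!pvDn p V i) && decide (0 < pvL p V ((i + V.length - 1) % V.length) i)

-- Pre_ admits four kinds of inputs: (1) the index-0 check fires (both programs return 0
-- immediately; the guards only ensure the Python evaluates it without IndexError);
-- (2)/(3) tiny polygon counts n = 2..5 where the search's first midpoint n//2 is the first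
-- index whose tangent test fires in scan order (both return n//2); (4) the genuinely convex
-- configurations: the cross-product order seen from p is strict and transitive and the
-- tangent test holds at exactly one index t < n-1.  It excludes inputs on which A raises
-- IndexError or loops forever, and the remaining degenerate non-convex inputs, on which A's
-- binary search, when it happens to return at all, lands on an accidental one of several
-- tangent indices (B returns the first in scan order there).
def Pre_leftTangent (p : Int × Int) (n : Int) (V : List (Int × Int)) : Prop :=
  (2 ≤ V.length ∧ -(V.length : Int) ≤ n - 1 ∧ n - 1 < (V.length : Int) ∧ pvChk p n V = true) ∨
  ((n = 2 ∨ n = 3) ∧ 3 ≤ V.length ∧ pvTestI p V 1 = true) ∨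
  ((n = 4 ∨ n = 5) ∧ 4 ≤ V.length ∧ pvTestI p V 1 = false ∧ pvTestI p V 2 = true) ∨
  (n = (V.length : Int) ∧ 3 ≤ V.length ∧
   (∀ i < V.length, ∀ j < V.length, i ≠ j → pvL p V i j ≠ 0) ∧
   (∀ i < V.length, ∀ j < V.length, ∀ k < V.length,
       0 < pvL p V i j → 0 < pvL p V j k → 0 < pvL p V i k) ∧
   (∃ t < V.length - 1, pvTang p V t = true ∧ ∀ u < V.length, pvTang p V u = true → u = t))

instance (p : Int × Int) (n : Int) (V : List (Int × Int)) : Decidable (Pre_leftTangent p n V) := by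
  unfold Pre_leftTangent
  refine @instDecidableOr _ _ ?_ (@instDecidableOr _ _ ?_ (@instDecidableOr _ _ ?_ ?_)) <;> infer_instance

def pvWitness_leftTangent : (Int × Int) × Int × (List (Int × Int)) :=
  ((1, 3), 3, [(0, 0), (2, 0), (1, 2)])

def Spec_leftTangent (p : Int × Int) (n : Int) (V : List (Int × Int)) (out : Int) : Prop :=
  out = leftTangent_alt p n V
instance (p : Int × Int) (n : Int) (V : List (Int × Int)) (out : Int) :
    Decidable (Spec_leftTangent p n V out) := by unfold Spec_leftTangent; infer_instance

-- ===== CLAIM (what is proved, stated in full; the proofs are below) =====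
def Claim_equal_leftTangent : Prop := ∀ (p : Int × Int) (n : Int) (V : List (Int × Int)),
  Dom_leftTangent p n V → Pre_leftTangent p n V → Spec_leftTangent p n V (leftTangent p n V)

-- ===== LEMMAS AND PROOFS =====

-- the hypotheses of Pre_leftTangent, bundled, with the tangent index t made explicit
structure PvCtx (p : Int × Int) (V : List (Int × Int)) (t : Nat) : Prop where
  hn : 3 ≤ V.length
  tot : ∀ i < V.length, ∀ j < V.length, i ≠ j → pvL p V i j ≠ 0
  tr : ∀ i < V.length, ∀ j < V.length, ∀ k < V.length,
      0 < pvL p V i j → 0 < pvL p V j k → 0 < pvL p V i k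
  ht : t < V.length - 1
  htang : pvTang p V t = true
  huniq : ∀ u < V.length, pvTang p V u = true → u = t

-- one-step unfoldings of the two loops (definitional)
theorem leftTangentLoop_succ (p : Int × Int) (V : List (Int × Int)) (fuel : Nat) (a b : Int) :
    leftTangentLoop p V (fuel + 1) a b =
      (if (!pvBelow p (pvGet V (PySem.Int.floordiv (a + b) 2 + 1)) (pvGet V (PySem.Int.floordiv (a + b) 2))) &&
          pvAbove p (pvGet V (PySem.Int.floordiv (a + b) 2 - 1)) (pvGet V (PySem.Int.floordiv (a + b) 2)) then
        PySem.Int.floordiv (a + b) 2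
      else if pvBelow p (pvGet V (a + 1)) (pvGet V a) then
        (if !pvBelow p (pvGet V (PySem.Int.floordiv (a + b) 2 + 1)) (pvGet V (PySem.Int.floordiv (a + b) 2)) then
          leftTangentLoop p V fuel a (PySem.Int.floordiv (a + b) 2)
        else if pvBelow p (pvGet V a) (pvGet V (PySem.Int.floordiv (a + b) 2)) then
          leftTangentLoop p V fuel a (PySem.Int.floordiv (a + b) 2)
        else leftTangentLoop p V fuel (PySem.Int.floordiv (a + b) 2) b)
      else
        (if pvBelow p (pvGet V (PySem.Int.floordiv (a + b) 2 + 1)) (pvGet V (PySem.Int.floordiv (a + b) 2)) then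
          leftTangentLoop p V fuel (PySem.Int.floordiv (a + b) 2) b
        else if pvAbove p (pvGet V a) (pvGet V (PySem.Int.floordiv (a + b) 2)) then
          leftTangentLoop p V fuel a (PySem.Int.floordiv (a + b) 2)
        else leftTangentLoop p V fuel (PySem.Int.floordiv (a + b) 2) b)) := rfl

theorem leftTangentScan_succ (p : Int × Int) (V : List (Int × Int)) (fuel : Nat) (i : Int) :
    leftTangentScan p V (fuel + 1) i =
      (if pvTestI p V i then i else leftTangentScan p V fuel (i + 1)) := rfl

theorem pvL_antisymm (p : Int × Int) (V : List (Int × Int)) (i j : Nat) :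
    pvL p V i j = - pvL p V j i := by
  simp only [pvL, pvIsLeft]; ring

-- index arithmetic for the cyclic neighbours
theorem pv_prev_zero {n : Nat} (h : 0 < n) : (0 + n - 1) % n = n - 1 := by
  rw [Nat.zero_add]; exact Nat.mod_eq_of_lt (by omega)

theorem pv_prev_pos {i n : Nat} (h1 : 1 ≤ i) (h2 : i < n) : (i + n - 1) % n = i - 1 := by
  have e : i + n - 1 = n + (i - 1) := by omega
  rw [e, Nat.add_mod_left]; exact Nat.mod_eq_of_lt (by omega)

theorem pv_prev_succ {i n : Nat} (h : i < n) (h0 : 0 < n) : ((i + n - 1) % n + 1) % n = i := by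
  rcases Nat.eq_zero_or_pos i with rfl | hi
  · rw [pv_prev_zero h0, show n - 1 + 1 = n from by omega, Nat.mod_self]
  · rw [pv_prev_pos hi h, show i - 1 + 1 = i from by omega]; exact Nat.mod_eq_of_lt h

theorem pvDn_eq_lin (p : Int × Int) (V : List (Int × Int)) {i : Nat} (h : i + 1 < V.length) :
    pvDn p V i = decide (pvL p V (i + 1) i < 0) := by
  unfold pvDn; rw [Nat.mod_eq_of_lt h]

theorem pvDn_last (p : Int × Int) (V : List (Int × Int)) (h : 0 < V.length) :
    pvDn p V (V.length - 1) = decide (pvL p V 0 (V.length - 1) < 0) := by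
  unfold pvDn; rw [show V.length - 1 + 1 = V.length from by omega, Nat.mod_self]

theorem pvLt_of_not_lt {p : Int × Int} {V : List (Int × Int)} {t : Nat} (h : PvCtx p V t)
    {i j : Nat} (hi : i < V.length) (hj : j < V.length) (hij : i ≠ j)
    (hn : ¬ pvL p V i j < 0) : pvL p V j i < 0 := by
  have h0 := h.tot i hi j hj hij
  have ha := pvL_antisymm p V j i
  omega

theorem pvTrL {p : Int × Int} {V : List (Int × Int)} {t : Nat} (h : PvCtx p V t)
    {i j k : Nat} (hi : i < V.length) (hj : j < V.length) (hk : k < V.length)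
    (h1 : pvL p V i j < 0) (h2 : pvL p V j k < 0) : pvL p V i k < 0 := by
  have a1 := pvL_antisymm p V i j
  have a2 := pvL_antisymm p V j k
  have a3 := pvL_antisymm p V i k
  have := h.tr k hk j hj i hi (by omega) (by omega)
  omega

-- a failed descent step off the tangent index propagates: no second down→up switch
theorem pvStep {p : Int × Int} {V : List (Int × Int)} {t : Nat} (h : PvCtx p V t)
    {i : Nat} (hi : i < V.length) (hit : i ≠ t)
    (hd : pvDn p V ((i + V.length - 1) % V.length) = true) : pvDn p V i = true := by
  by_contra hni
  have hni' : pvDn p V i = false := by revert hni; cases pvDn p V i <;> simp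
  have h0 : 0 < V.length := by have := h.hn; omega
  have hprev : pvL p V (((i + V.length - 1) % V.length + 1) % V.length)
      ((i + V.length - 1) % V.length) < 0 := by
    have := hd; unfold pvDn at this; simpa using this
  rw [pv_prev_succ hi h0] at hprev
  have hpos : 0 < pvL p V ((i + V.length - 1) % V.length) i := by
    have := pvL_antisymm p V i ((i + V.length - 1) % V.length); omega
  have htg : pvTang p V i = true := by unfold pvTang; simp [hni', hpos]
  exact hit (h.huniq i hi htg)

theorem pvStepLin {p : Int × Int} {V : List (Int × Int)} {t : Nat} (h : PvCtx p V t)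
    {i : Nat} (h1 : 1 ≤ i) (h2 : i < V.length) (hit : i ≠ t)
    (hd : pvDn p V (i - 1) = true) : pvDn p V i = true := by
  apply pvStep h h2 hit
  rw [pv_prev_pos h1 h2]; exact hd

theorem pvStepWrap {p : Int × Int} {V : List (Int × Int)} {t : Nat} (h : PvCtx p V t)
    (ht0 : t ≠ 0) (hd : pvDn p V (V.length - 1) = true) : pvDn p V 0 = true := by
  have h0 : 0 < V.length := by have := h.hn; omega
  apply pvStep h h0 (by omega)
  rw [pv_prev_zero h0]; exact hd

-- descent is preserved along a segment avoiding t
theorem pvMonoSeg {p : Int × Int} {V : List (Int × Int)} {t : Nat} (h : PvCtx p V t) :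
    ∀ (d i : Nat), i + d < V.length → (∀ k, i < k → k ≤ i + d → k ≠ t) →
      pvDn p V i = true → pvDn p V (i + d) = true := by
  intro d
  induction d with
  | zero => intro i _ _ hd; simpa using hd
  | succ d ih =>
    intro i hlt hk hd
    have h1 : pvDn p V (i + d) = true := ih i (by omega) (fun k a b => hk k a (by omega)) hd
    have := pvStepLin h (i := i + d + 1) (by omega) (by omega) (hk (i + d + 1) (by omega) (by omega))
    rw [show i + d + 1 - 1 = i + d from by omega] at this
    have := this h1
    simpa [show i + (d+1) = i + d + 1 from by omega] using this

-- chain of descents: the later vertex is smaller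
theorem pvDescChain {p : Int × Int} {V : List (Int × Int)} {t : Nat} (h : PvCtx p V t) :
    ∀ (d i : Nat), 0 < d → i + d < V.length →
      (∀ k, i ≤ k → k < i + d → pvDn p V k = true) → pvL p V (i + d) i < 0 := by
  intro d
  induction d with
  | zero => omega
  | succ d ih =>
    intro i _ hlt hk
    have hstep : pvL p V (i + d + 1) (i + d) < 0 := by
      have := hk (i + d) (by omega) (by omega)
      rw [pvDn_eq_lin p V (by omega)] at this
      simpa using this
    rcases Nat.eq_zero_or_pos d with rfl | hd
    · simpa using hstep
    · have h1 : pvL p V (i + d) i < 0 := ih i hd (by omega) (fun k a b => hk k a (by omega))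
      have := pvTrL h (i := i + d + 1) (j := i + d) (k := i) (by omega) (by omega) (by omega) hstep h1
      simpa [show i + (d+1) = i + d + 1 from by omega] using this

-- chain of ascents: the later vertex is larger
theorem pvAscChain {p : Int × Int} {V : List (Int × Int)} {t : Nat} (h : PvCtx p V t) :
    ∀ (d i : Nat), 0 < d → i + d < V.length →
      (∀ k, i ≤ k → k < i + d → pvDn p V k = false) → pvL p V i (i + d) < 0 := by
  intro d
  induction d with
  | zero => omega
  | succ d ih =>
    intro i _ hlt hk
    have hstep : pvL p V (i + d) (i + d + 1) < 0 := by
      have hf := hk (i + d) (by omega) (by omega)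
      rw [pvDn_eq_lin p V (by omega)] at hf
      have : ¬ pvL p V (i + d + 1) (i + d) < 0 := by simpa using hf
      exact pvLt_of_not_lt h (by omega) (by omega) (by omega) this
    rcases Nat.eq_zero_or_pos d with rfl | hd
    · simpa using hstep
    · have h1 : pvL p V i (i + d) < 0 := ih i hd (by omega) (fun k a b => hk k a (by omega))
      have := pvTrL h (i := i) (j := i + d) (k := i + d + 1) (by omega) (by omega) (by omega) h1 hstep
      simpa [show i + (d+1) = i + d + 1 from by omega] using this

-- if the ascent reaches below t (¬dn a, a < t), everything from t up and below a ascends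
theorem pvNotDnLow {p : Int × Int} {V : List (Int × Int)} {t : Nat} (h : PvCtx p V t)
    {a : Nat} (hat : a < t) (hnd : pvDn p V a = false) :
    ∀ k, k < a → pvDn p V k = false := by
  intro k hk
  by_contra hkd
  have hkd' : pvDn p V k = true := by revert hkd; cases pvDn p V k <;> simp
  have hlen : a < V.length := by have := h.ht; omega
  have := pvMonoSeg h (a - k) k (by omega) (fun u hu1 hu2 => by omega) hkd'
  rw [show k + (a - k) = a from by omega] at this
  rw [hnd] at this; exact Bool.false_ne_true this

theorem pvNotDnHigh {p : Int × Int} {V : List (Int × Int)} {t : Nat} (h : PvCtx p V t)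
    {a : Nat} (hat : a < t) (hnd : pvDn p V a = false) :
    ∀ k, t ≤ k → k < V.length → pvDn p V k = false := by
  intro k hk1 hk2
  by_contra hkd
  have hkd' : pvDn p V k = true := by revert hkd; cases pvDn p V k <;> simp
  have hlast : pvDn p V (V.length - 1) = true := by
    have := pvMonoSeg h (V.length - 1 - k) k (by omega) (fun u hu1 hu2 => by omega) hkd'
    rwa [show k + (V.length - 1 - k) = V.length - 1 from by omega] at this
  have h0 : pvDn p V 0 = true := pvStepWrap h (by omega) hlast
  have ha : pvDn p V a = true := by
    rcases Nat.eq_zero_or_pos a with rfl | hap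
    · exact h0
    · have := pvMonoSeg h a 0 (by have := h.ht; omega) (fun u hu1 hu2 => by omega) h0
      simpa using this
  rw [hnd] at ha; exact Bool.false_ne_true ha

-- if the descent reaches above t (dn c, t < c), everything from c on descends
theorem pvDnHigh {p : Int × Int} {V : List (Int × Int)} {t : Nat} (h : PvCtx p V t)
    {c : Nat} (htc : t < c) (_hcn : c < V.length) (hd : pvDn p V c = true) :
    ∀ k, c ≤ k → k < V.length → pvDn p V k = true := by
  intro k hk1 hk2
  have := pvMonoSeg h (k - c) c (by omega) (fun u hu1 hu2 => by omega) hd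
  rwa [show c + (k - c) = k from by omega] at this

-- case lemma: a < t < c with descent at c forces V[a] below V[c]
theorem pvCaseDesc {p : Int × Int} {V : List (Int × Int)} {t : Nat} (h : PvCtx p V t)
    {a c : Nat} (hat : a < t) (htc : t < c) (hc : c < V.length)
    (hd : pvDn p V c = true) : pvL p V a c < 0 := by
  have hn3 := h.hn
  have hlast : pvDn p V (V.length - 1) = true := pvDnHigh h htc hc hd (V.length - 1) (by omega) (by omega)
  have hw : pvL p V 0 (V.length - 1) < 0 := by
    have := hlast; rw [pvDn_last p V (by omega)] at this; simpa using this
  have h0c : pvL p V 0 c < 0 := by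
    rcases Nat.lt_or_ge c (V.length - 1) with hlt | hge
    · have hch : pvL p V (V.length - 1) c < 0 := by
        have := pvDescChain h (V.length - 1 - c) c (by omega) (by omega)
          (fun k hk1 hk2 => pvDnHigh h htc hc hd k hk1 (by omega))
        rwa [show c + (V.length - 1 - c) = V.length - 1 from by omega] at this
      exact pvTrL h (by omega) (by omega) (by omega) hw hch
    · have : c = V.length - 1 := by omega
      rw [this]; exact hw
  rcases Nat.eq_zero_or_pos a with rfl | hap
  · exact h0c
  · have hdn0 : pvDn p V 0 = true := pvStepWrap h (by omega) hlast
    have hdnk : ∀ k, k < a → pvDn p V k = true := by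
      intro k hk
      rcases Nat.eq_zero_or_pos k with rfl | hkp
      · exact hdn0
      · have := pvMonoSeg h k 0 (by omega) (fun u hu1 hu2 => by omega) hdn0
        simpa using this
    have ha0 : pvL p V a 0 < 0 := by
      have := pvDescChain h a 0 (by omega) (by omega) (fun k hk1 hk2 => hdnk k (by omega))
      simpa using this
    exact pvTrL h (by omega) (by omega) (by omega) ha0 h0c

-- case lemma: a < t < c with ascent still at a forces V[c] below V[a]
theorem pvCaseAsc {p : Int × Int} {V : List (Int × Int)} {t : Nat} (h : PvCtx p V t)
    {a c : Nat} (hat : a < t) (htc : t < c) (hc : c < V.length)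
    (hnd : pvDn p V a = false) : pvL p V c a < 0 := by
  have hn3 := h.hn
  have hlast : pvDn p V (V.length - 1) = false :=
    pvNotDnHigh h hat hnd (V.length - 1) (by omega) (by omega)
  have hw : pvL p V (V.length - 1) 0 < 0 := by
    rw [pvDn_last p V (by omega)] at hlast
    have : ¬ pvL p V 0 (V.length - 1) < 0 := by simpa using hlast
    exact pvLt_of_not_lt h (by omega) (by omega) (by omega) this
  have hc0 : pvL p V c 0 < 0 := by
    rcases Nat.lt_or_ge c (V.length - 1) with hlt | hge
    · have hch : pvL p V c (V.length - 1) < 0 := by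
        have := pvAscChain h (V.length - 1 - c) c (by omega) (by omega)
          (fun k hk1 hk2 => pvNotDnHigh h hat hnd k (by omega) (by omega))
        rwa [show c + (V.length - 1 - c) = V.length - 1 from by omega] at this
      exact pvTrL h (by omega) (by omega) (by omega) hch hw
    · have : c = V.length - 1 := by omega
      rw [this]; exact hw
  rcases Nat.eq_zero_or_pos a with rfl | hap
  · exact hc0
  · have h0a : pvL p V 0 a < 0 := by
      have := pvAscChain h a 0 (by omega) (by omega) (fun k hk1 hk2 => pvNotDnLow h hat hnd k (by omega))
      simpa using this
    exact pvTrL h (by omega) (by omega) (by omega) hc0 h0a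

-- case lemmas on the low side: a < c < t
theorem pvCaseIV {p : Int × Int} {V : List (Int × Int)} {t : Nat} (h : PvCtx p V t)
    {a c : Nat} (hac : a < c) (hct : c < t) (hd : pvDn p V a = true) : pvDn p V c = true := by
  have hlen : t < V.length := by have := h.ht; omega
  have := pvMonoSeg h (c - a) a (by omega) (fun u hu1 hu2 => by omega) hd
  rwa [show a + (c - a) = c from by omega] at this

theorem pvCaseV {p : Int × Int} {V : List (Int × Int)} {t : Nat} (h : PvCtx p V t)
    {a c : Nat} (hac : a < c) (hct : c < t) (hd : pvDn p V a = true) : pvL p V c a < 0 := by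
  have hlen : t < V.length := by have := h.ht; omega
  have := pvDescChain h (c - a) a (by omega) (by omega)
    (fun k hk1 hk2 => by
      rcases Nat.eq_or_lt_of_le hk1 with rfl | hlt
      · exact hd
      · exact pvCaseIV h hlt (by omega) hd)
  rwa [show a + (c - a) = c from by omega] at this

theorem pvCaseVI {p : Int × Int} {V : List (Int × Int)} {t : Nat} (h : PvCtx p V t)
    {a c : Nat} (hac : a < c) (hct : c < t) (hnd : pvDn p V c = false) : pvL p V a c < 0 := by
  have hlen : t < V.length := by have := h.ht; omega
  have := pvAscChain h (c - a) a (by omega) (by omega)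
    (fun k hk1 hk2 => by
      by_contra hkd
      have hkd' : pvDn p V k = true := by revert hkd; cases pvDn p V k <;> simp
      have := pvCaseIV h (a := k) (c := c) (by omega) hct hkd'
      rw [hnd] at this; exact Bool.false_ne_true this)
  rwa [show a + (c - a) = c from by omega] at this

-- bridge from the ports' Int indexing to the Nat indexing of pvL/pvDn/pvTang
theorem pvGet_cast (V : List (Int × Int)) (k : Nat) : pvGet V (k : Int) = V.getD k (0, 0) := by
  simp [pvGet]

theorem pvBelow_eq (p : Int × Int) (V : List (Int × Int)) (i j : Nat) :
    pvBelow p (V.getD i (0, 0)) (V.getD j (0, 0)) = decide (pvL p V i j < 0) := rfl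

theorem pvAbove_eq (p : Int × Int) (V : List (Int × Int)) (i j : Nat) :
    pvAbove p (V.getD i (0, 0)) (V.getD j (0, 0)) = decide (0 < pvL p V i j) := rfl

-- the tangent test both programs apply at an interior index 1 ≤ k ≤ n-2
theorem pvTest_eq_tang (p : Int × Int) (V : List (Int × Int)) {k : Nat}
    (h1 : 1 ≤ k) (h2 : k + 1 < V.length) :
    ((!pvBelow p (pvGet V ((k : Int) + 1)) (pvGet V (k : Int))) &&
      pvAbove p (pvGet V ((k : Int) - 1)) (pvGet V (k : Int))) = pvTang p V k := by
  have e1 : (k : Int) + 1 = ((k + 1 : Nat) : Int) := by push_cast; ring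
  have e2 : (k : Int) - 1 = ((k - 1 : Nat) : Int) := by omega
  rw [e1, e2, pvGet_cast, pvGet_cast, pvGet_cast, pvBelow_eq, pvAbove_eq]
  unfold pvTang
  rw [pvDn_eq_lin p V h2, pv_prev_pos h1 (by omega)]

theorem pvTestI_eq_tang (p : Int × Int) (V : List (Int × Int)) {k : Nat}
    (h1 : 1 ≤ k) (h2 : k + 1 < V.length) : pvTestI p V (k : Int) = pvTang p V k :=
  pvTest_eq_tang p V h1 h2

-- the binary-search loop of A returns t whenever the invariant a < t < b holds
theorem pvLoopMain {p : Int × Int} {V : List (Int × Int)} {t : Nat} (h : PvCtx p V t) :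
    ∀ (fuel : Nat) (a b : Int), 0 ≤ a → a < (t : Int) → (t : Int) < b → b ≤ (V.length : Int) →
      (b - a).toNat ≤ fuel → leftTangentLoop p V fuel a b = (t : Int) := by
  intro fuel
  induction fuel with
  | zero => intro a b ha hat htb hbn hf; omega
  | succ fuel ih =>
    intro a b ha hat htb hbn hf
    have hn3 := h.hn
    have hlen : t + 1 < V.length := by have := h.ht; omega
    have hab2 : a + 2 ≤ b := by omega
    rw [leftTangentLoop_succ]
    set c := PySem.Int.floordiv (a + b) 2 with hc
    have hcl : a + 1 ≤ c := by
      rw [hc, PySem.Int.le_floordiv_iff_mul_le (by omega)]; omega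
    have hcr : c < b := by
      rw [hc, PySem.Int.floordiv_lt_iff_lt_mul (by omega)]; omega
    have hcu : c < (V.length : Int) - 1 := by
      rw [hc, PySem.Int.floordiv_lt_iff_lt_mul (by omega)]; omega
    -- Nat images of a and c
    set j := a.toNat with hj
    set k := c.toNat with hk
    have hja : (j : Int) = a := by omega
    have hkc : (k : Int) = c := by omega
    have hk1 : 1 ≤ k := by omega
    have hk2 : k + 1 < V.length := by omega
    have hj2 : j + 1 < V.length := by omega
    have hjk : j < k := by omega
    have hjt : j < t := by omega
    -- rewrite the three probe expressions
    have eC : pvBelow p (pvGet V (c + 1)) (pvGet V c) = pvDn p V k := by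
      rw [← hkc, show (k : Int) + 1 = ((k + 1 : Nat) : Int) from by push_cast; ring,
        pvGet_cast, pvGet_cast, pvBelow_eq, pvDn_eq_lin p V hk2]
    have eA : pvBelow p (pvGet V (a + 1)) (pvGet V a) = pvDn p V j := by
      rw [← hja, show (j : Int) + 1 = ((j + 1 : Nat) : Int) from by push_cast; ring,
        pvGet_cast, pvGet_cast, pvBelow_eq, pvDn_eq_lin p V hj2]
    have eBel : pvBelow p (pvGet V a) (pvGet V c) = decide (pvL p V j k < 0) := by
      rw [← hja, ← hkc, pvGet_cast, pvGet_cast, pvBelow_eq]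
    have eAb : pvAbove p (pvGet V a) (pvGet V c) = decide (0 < pvL p V j k) := by
      rw [← hja, ← hkc, pvGet_cast, pvGet_cast, pvAbove_eq]
    have eTest : ((!pvBelow p (pvGet V (c + 1)) (pvGet V c)) &&
        pvAbove p (pvGet V (c - 1)) (pvGet V c)) = pvTang p V k := by
      rw [← hkc]; exact pvTest_eq_tang p V hk1 hk2
    rw [eTest, eA, eC, eBel, eAb]
    by_cases hkt : k = t
    · -- the test fires and the loop returns c = t
      rw [hkt, h.htang]
      simp only [if_true]
      omega
    · have hnt : pvTang p V k = false := by
        by_contra hx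
        have : pvTang p V k = true := by revert hx; cases pvTang p V k <;> simp
        exact hkt (h.huniq k (by omega) this)
      rw [hnt]
      simp only [Bool.false_eq_true, if_false]
      -- the six leaves
      rcases hdA : pvDn p V j with _ | _ <;> rcases hdC : pvDn p V k with _ | _ <;>
        simp only [Bool.not_false, Bool.not_true, Bool.false_eq_true, if_true, if_false]
      · -- ¬dnA, ¬dnC : compare V[a] with V[c]
        by_cases hab : 0 < pvL p V j k
        · -- above → b := c ; t < k
          have htk : (t : Int) < c := by
            rcases Nat.lt_or_ge k t with hlt | hge
            · exfalso
              have := pvCaseVI h hjk hlt hdC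
              have ha2 := pvL_antisymm p V j k
              omega
            · omega
          rw [if_pos (by simpa using hab)]
          exact ih a c ha hat htk (by omega) (by omega)
        · -- not above → a := c ; k < t
          have htk : c < (t : Int) := by
            rcases Nat.lt_or_ge t k with hlt | hge
            · exfalso
              have := pvCaseAsc h hjt hlt (by omega) hdA
              have ha2 := pvL_antisymm p V j k
              omega
            · omega
          rw [if_neg (by simpa using hab)]
          exact ih c b (by omega) htk htb hbn (by omega)
      · -- ¬dnA, dnC → a := c ; k < t
        have htk : c < (t : Int) := by
          rcases Nat.lt_or_ge t k with hlt | hge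
          · exfalso
            have h1 := pvCaseAsc h hjt hlt (by omega) hdA
            have h2 := pvCaseDesc h hjt hlt (by omega) hdC
            have ha2 := pvL_antisymm p V j k
            omega
          · omega
        exact ih c b (by omega) htk htb hbn (by omega)
      · -- dnA, ¬dnC → b := c ; t < k
        have htk : (t : Int) < c := by
          rcases Nat.lt_or_ge k t with hlt | hge
          · exfalso
            have := pvCaseIV h hjk hlt hdA
            rw [hdC] at this; exact Bool.false_ne_true this
          · omega
        exact ih a c ha hat htk (by omega) (by omega)
      · -- dnA, dnC : compare V[a] with V[c]
        by_cases hbel : pvL p V j k < 0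
        · -- below → b := c ; t < k
          have htk : (t : Int) < c := by
            rcases Nat.lt_or_ge k t with hlt | hge
            · exfalso
              have := pvCaseV h hjk hlt hdA
              have ha2 := pvL_antisymm p V j k
              omega
            · omega
          rw [if_pos (by simpa using hbel)]
          exact ih a c ha hat htk (by omega) (by omega)
        · -- not below → a := c ; k < t
          have htk : c < (t : Int) := by
            rcases Nat.lt_or_ge t k with hlt | hge
            · exfalso
              have := pvCaseDesc h hjt hlt (by omega) hdC
              omega
            · omega
          rw [if_neg (by simpa using hbel)]
          exact ih c b (by omega) htk htb hbn (by omega)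

-- the linear scan of B returns t
theorem pvScanMain {p : Int × Int} {V : List (Int × Int)} {t : Nat} (h : PvCtx p V t) :
    ∀ (fuel : Nat) (i : Nat), 1 ≤ i → i ≤ t → t - i < fuel →
      leftTangentScan p V fuel (i : Int) = (t : Int) := by
  intro fuel
  induction fuel with
  | zero => intro i _ _ hf; omega
  | succ fuel ih =>
    intro i h1 h2 hf
    have hlen : t + 1 < V.length := by have := h.ht; omega
    have hi2 : i + 1 < V.length := by omega
    rw [leftTangentScan_succ, pvTestI_eq_tang p V h1 hi2]
    by_cases hit : i = t
    · simp [hit, h.htang]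
    · have hnt : pvTang p V i = false := by
        by_contra hx
        have : pvTang p V i = true := by revert hx; cases pvTang p V i <;> simp
        exact hit (h.huniq i (by omega) this)
      rw [hnt]
      simp only [Bool.false_eq_true, if_false]
      have e : (i : Int) + 1 = ((i + 1 : Nat) : Int) := by push_cast; ring
      rw [e]
      exact ih (i + 1) (by omega) (by omega) (by omega)

-- ===== VERDICT (by name: the statement is the Claim_ definition above) =====
theorem leftTangent_spec : Claim_equal_leftTangent := by
  intro p n V _hdom hpre
  unfold Spec_leftTangent leftTangent leftTangent_alt
  rcases hpre with ⟨_, _, _, hchk⟩ | ⟨hn23, _hl3, hT1⟩ | ⟨hn45, _hl4, hT1, hT2⟩ |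
    ⟨hn, hlen, htot, htr, t, ht, htang, huniq⟩
  · -- (1) the index-0 check fires in both programs
    simp [hchk]
  · -- (2) n = 2 or 3: both programs return 1, their first probed index
    by_cases hchk : pvChk p n V = true
    · simp [hchk]
    · have hchk' : pvChk p n V = false := by revert hchk; cases pvChk p n V <;> simp
      simp only [hchk', Bool.false_eq_true, if_false]
      rcases hn23 with rfl | rfl
      · rw [show V.length + 2 = (V.length + 1) + 1 from rfl, leftTangentLoop_succ,
          show PySem.Int.floordiv ((0 : Int) + 2) 2 = 1 from by decide,
          show ((!pvBelow p (pvGet V ((1 : Int) + 1)) (pvGet V (1 : Int))) &&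
            pvAbove p (pvGet V ((1 : Int) - 1)) (pvGet V (1 : Int))) = pvTestI p V 1 from rfl,
          hT1,
          show ((2 : Int) - 1).toNat = 0 + 1 from by decide, leftTangentScan_succ, hT1]
        simp
      · rw [show V.length + 2 = (V.length + 1) + 1 from rfl, leftTangentLoop_succ,
          show PySem.Int.floordiv ((0 : Int) + 3) 2 = 1 from by decide,
          show ((!pvBelow p (pvGet V ((1 : Int) + 1)) (pvGet V (1 : Int))) &&
            pvAbove p (pvGet V ((1 : Int) - 1)) (pvGet V (1 : Int))) = pvTestI p V 1 from rfl,
          hT1,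
          show ((3 : Int) - 1).toNat = 1 + 1 from by decide, leftTangentScan_succ, hT1]
        simp
  · -- (3) n = 4 or 5: both programs return 2, the first index whose test fires
    by_cases hchk : pvChk p n V = true
    · simp [hchk]
    · have hchk' : pvChk p n V = false := by revert hchk; cases pvChk p n V <;> simp
      simp only [hchk', Bool.false_eq_true, if_false]
      rcases hn45 with rfl | rfl
      · rw [show V.length + 2 = (V.length + 1) + 1 from rfl, leftTangentLoop_succ,
          show PySem.Int.floordiv ((0 : Int) + 4) 2 = 2 from by decide,
          show ((!pvBelow p (pvGet V ((2 : Int) + 1)) (pvGet V (2 : Int))) &&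
            pvAbove p (pvGet V ((2 : Int) - 1)) (pvGet V (2 : Int))) = pvTestI p V 2 from rfl,
          hT2,
          show ((4 : Int) - 1).toNat = 2 + 1 from by decide, leftTangentScan_succ, hT1,
          show (1 : Int) + 1 = 2 from by decide,
          show (2 : Nat) = 1 + 1 from rfl, leftTangentScan_succ, hT2]
        simp
      · rw [show V.length + 2 = (V.length + 1) + 1 from rfl, leftTangentLoop_succ,
          show PySem.Int.floordiv ((0 : Int) + 5) 2 = 2 from by decide,
          show ((!pvBelow p (pvGet V ((2 : Int) + 1)) (pvGet V (2 : Int))) &&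
            pvAbove p (pvGet V ((2 : Int) - 1)) (pvGet V (2 : Int))) = pvTestI p V 2 from rfl,
          hT2,
          show ((5 : Int) - 1).toNat = 3 + 1 from by decide, leftTangentScan_succ, hT1,
          show (1 : Int) + 1 = 2 from by decide,
          show (3 : Nat) = 2 + 1 from rfl, leftTangentScan_succ, hT2]
        simp
  · -- (4) the convex configurations: both return the unique tangent index t
    have h : PvCtx p V t := ⟨hlen, htot, htr, ht, htang, huniq⟩
    subst hn
    have e0 : pvGet V (0 : Int) = V.getD 0 (0, 0) := by simpa using pvGet_cast V 0
    have e1 : pvGet V (1 : Int) = V.getD 1 (0, 0) := by simpa using pvGet_cast V 1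
    have e2 : pvGet V ((V.length : Int) - 1) = V.getD (V.length - 1) (0, 0) := by
      rw [show (V.length : Int) - 1 = ((V.length - 1 : Nat) : Int) from by omega, pvGet_cast]
    have eChk : pvChk p (V.length : Int) V = pvTang p V 0 := by
      unfold pvChk
      rw [e0, e1, e2, pvBelow_eq, pvAbove_eq]
      unfold pvTang pvDn
      rw [pv_prev_zero (by omega), show (0 + 1) % V.length = 1 from Nat.mod_eq_of_lt (by omega)]
    rw [eChk]
    by_cases ht0 : t = 0
    · have : pvTang p V 0 = true := by rw [← ht0]; exact htang
      simp [this]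
    · have hthis : pvTang p V 0 = false := by
        by_contra hx
        have : pvTang p V 0 = true := by revert hx; cases pvTang p V 0 <;> simp
        exact ht0 (huniq 0 (by omega) this).symm
      rw [hthis]
      simp only [Bool.false_eq_true, if_false]
      have hA := pvLoopMain h (V.length + 2) 0 (V.length : Int) (by omega) (by omega)
        (by exact_mod_cast by omega) (le_refl _) (by omega)
      have hB := pvScanMain h ((V.length : Int) - 1).toNat 1 (by omega) (by omega) (by omega)
      rw [hA]
      simpa using hB.symm
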